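-- pv_equiv track=rewrite | github.com/wzp54/djava | app/rag_engine_qurey.py | reorder_lost_in_the_middle
-- ===== SOURCE A (Python) =====
-- def reorder_lost_in_the_middle(chunks):
--     """解决 Long Context 下的 Lost in the middle 问题"""
--     if not chunks or len(chunks) < 3:
--         return chunks
--     reordered = [None] * len(chunks)
--     left, right = 0, len(chunks) - 1
--     for i, chunk in enumerate(chunks):
--         if i % 2 == 0:
--             reordered[left] = chunk
--             left += 1
--         else:
--             reordered[right] = chunk
--             right -= 1
--     return reordered
-- ===== SOURCE B (Python) =====
-- def reorder_lost_in_the_middle(chunks):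
--     """解决 Long Context 下的 Lost in the middle 问题"""
--     if not chunks or len(chunks) < 3:
--         return chunks
--     even = chunks[::2]
--     odd = chunks[1::2]
--     return even + odd[::-1]
-- ===== Notes on version B (the rewrite author's own statement) =====
-- stated objective: simpler
-- what changed: Replaces the pre-allocated array filled from both ends with left/right pointers by two strided slices (even- and odd-indexed elements) concatenated with the odd slice reversed.
import Mathlib
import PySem

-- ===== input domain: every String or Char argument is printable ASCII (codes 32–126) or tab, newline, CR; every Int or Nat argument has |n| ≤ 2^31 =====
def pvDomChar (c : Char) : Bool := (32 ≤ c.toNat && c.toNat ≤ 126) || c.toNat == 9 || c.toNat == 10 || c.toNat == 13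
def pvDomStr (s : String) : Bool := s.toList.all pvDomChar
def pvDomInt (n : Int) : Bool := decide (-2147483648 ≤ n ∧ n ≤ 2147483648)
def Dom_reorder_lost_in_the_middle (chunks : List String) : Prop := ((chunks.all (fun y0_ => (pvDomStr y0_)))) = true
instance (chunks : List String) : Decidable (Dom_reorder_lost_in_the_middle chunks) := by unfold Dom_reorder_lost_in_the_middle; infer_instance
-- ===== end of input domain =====

-- B replaces A's two-pointer fill of a pre-allocated array by two strided slices
-- concatenated with the odd slice reversed (objective: simpler).


-- ===== PORT A =====
-- Literal port of A: reordered = [None]*n (List (Option String)); loop over enumerate(chunks)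
-- with state (reordered, left, right); at the end every slot holds a value, reduceOption
-- extracts the strings.  left/right are Nat: in A they stay within [0, n-1] at every use.
def reorder_lost_in_the_middle (chunks : List String) : List String :=
  if chunks.isEmpty || chunks.length < 3 then chunks
  else
    let reordered : List (Option String) := List.replicate chunks.length none
    let st := (PySem.List.enumerate chunks).foldl
      (fun (s : List (Option String) × Nat × Nat) (p : Int × String) =>
        if p.1 % 2 == 0 then (s.1.set s.2.1 (some p.2), s.2.1 + 1, s.2.2)
        else (s.1.set s.2.2 (some p.2), s.2.1, s.2.2 - 1))
      (reordered, 0, chunks.length - 1)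
    st.1.reduceOption

-- ===== PORT B =====
-- Literal port of Source B: even = chunks[::2], odd = chunks[1::2], even + odd[::-1].
-- The step literals are nonzero, so slice? always returns some; getD [] extracts.
def reorder_lost_in_the_middle_alt (chunks : List String) : List String :=
  if chunks.isEmpty || chunks.length < 3 then chunks
  else
    let even := (PySem.List.slice? chunks none none 2).getD []
    let odd := (PySem.List.slice? chunks (some 1) none 2).getD []
    even ++ (PySem.List.slice? odd none none (-1)).getD []

-- ===== PRECONDITION & SPEC =====
def Spec_reorder_lost_in_the_middle (chunks : List String) (out : List String) : Prop := out = reorder_lost_in_the_middle_alt chunks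
instance (chunks : List String) (out : List String) : Decidable (Spec_reorder_lost_in_the_middle chunks out) := by unfold Spec_reorder_lost_in_the_middle; infer_instance

-- ===== CLAIM (what is proved, stated in full; the proofs are below) =====
def Claim_equal_reorder_lost_in_the_middle : Prop := ∀ (chunks : List String), Dom_reorder_lost_in_the_middle chunks → Spec_reorder_lost_in_the_middle chunks (reorder_lost_in_the_middle chunks)

-- ===== LEMMAS AND PROOFS =====

-- every other element of a list, starting with the first
def strided : List String → List String
  | [] => []
  | [x] => [x]
  | x :: _ :: xs => x :: strided xs

def evens (xs : List String) : List String := strided xs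
def odds (xs : List String) : List String := strided xs.tail

theorem strided_cons (x : String) (xs : List String) :
    strided (x :: xs) = x :: strided xs.tail := by
  cases xs <;> rfl

theorem evens_cons (x : String) (xs : List String) : evens (x :: xs) = x :: odds xs :=
  strided_cons x xs

theorem odds_cons (x : String) (xs : List String) : odds (x :: xs) = evens xs := rfl

theorem length_evens_add_odds (xs : List String) :
    (evens xs).length + (odds xs).length = xs.length := by
  induction xs using strided.induct with
  | case1 => rfl
  | case2 x => rfl
  | case3 x y xs ih =>
      simp only [evens, odds, List.tail_cons] at *
      rw [strided, strided_cons]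
      simp only [List.length_cons]
      omega

-- abstract form of A's loop: the parity flag replaces the enumerate index
def go2 (r : List (Option String)) (l rt : Nat) (b : Bool) : List String → List (Option String)
  | [] => r
  | x :: xs =>
      if b then go2 (r.set l (some x)) (l + 1) rt (!b) xs
      else go2 (r.set rt (some x)) l (rt - 1) (!b) xs

def writeAsc (r : List (Option String)) (l : Nat) : List String → List (Option String)
  | [] => r
  | e :: es => writeAsc (r.set l (some e)) (l + 1) es

def writeDesc (r : List (Option String)) (rt : Nat) : List String → List (Option String)
  | [] => r
  | o :: os => writeDesc (r.set rt (some o)) (rt - 1) os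

theorem parity_flip (k : Int) : (((k + 1) % 2 == 0) : Bool) = !(k % 2 == 0) := by
  by_cases h : k % 2 = 0
  · have h2 : (k + 1) % 2 = 1 := by omega
    simp [h, h2]
  · have h0 : k % 2 = 1 := by omega
    have h2 : (k + 1) % 2 = 0 := by omega
    simp [h0, h2]

theorem foldl_enum_eq_go2 (xs : List String) :
    ∀ (k : Int) (r : List (Option String)) (l rt : Nat),
    ((PySem.List.enumerate xs k).foldl
      (fun (s : List (Option String) × Nat × Nat) (p : Int × String) =>
        if p.1 % 2 == 0 then (s.1.set s.2.1 (some p.2), s.2.1 + 1, s.2.2)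
        else (s.1.set s.2.2 (some p.2), s.2.1, s.2.2 - 1))
      (r, l, rt)).1 = go2 r l rt (k % 2 == 0) xs := by
  induction xs with
  | nil => intro k r l rt; rfl
  | cons x xs ih =>
      intro k r l rt
      rw [PySem.List.enumerate_cons, List.foldl_cons]
      cases hb : ((k % 2 == 0) : Bool) with
      | true =>
          simp only [reduceIte, go2]
          rw [ih (k + 1), parity_flip, hb]
      | false =>
          simp only [Bool.false_eq_true, reduceIte, go2]
          rw [ih (k + 1), parity_flip, hb]

theorem writeDesc_set (es : List String) :
    ∀ (r : List (Option String)) (j rt : Nat) (v : Option String), j + es.length ≤ rt →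
    writeDesc (r.set j v) rt es = (writeDesc r rt es).set j v := by
  induction es with
  | nil => intro r j rt v _; rfl
  | cons e es ih =>
      intro r j rt v h
      simp only [List.length_cons] at h
      simp only [writeDesc]
      rw [List.set_comm v (some e) (by omega : j ≠ rt), ih _ j (rt - 1) v (by omega)]

theorem writeAsc_writeDesc_comm (os : List String) :
    ∀ (es : List String) (r : List (Option String)) (l rt : Nat),
    l + os.length + es.length ≤ rt + 1 →
    writeAsc (writeDesc r rt es) l os = writeDesc (writeAsc r l os) rt es := by
  induction os with
  | nil => intro es r l rt _; rfl
  | cons o os ih =>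
      intro es r l rt h
      simp only [List.length_cons] at h
      simp only [writeAsc]
      rw [← writeDesc_set es r l rt (some o) (by omega), ih es _ (l + 1) rt (by omega)]

theorem go2_spec (xs : List String) :
    ∀ (r : List (Option String)) (l rt : Nat),
    l + (evens xs).length + (odds xs).length ≤ rt + 1 →
    (go2 r l rt true xs = writeDesc (writeAsc r l (evens xs)) rt (odds xs)) ∧
    (go2 r l rt false xs = writeAsc (writeDesc r rt (evens xs)) l (odds xs)) := by
  induction xs with
  | nil => intro r l rt _; exact ⟨rfl, rfl⟩
  | cons x xs ih =>
      intro r l rt h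
      rw [evens_cons, odds_cons] at h ⊢
      simp only [List.length_cons] at h
      have hlen : (evens xs).length + (odds xs).length = xs.length := length_evens_add_odds xs
      constructor
      · show go2 (r.set l (some x)) (l + 1) rt false xs = _
        rw [(ih (r.set l (some x)) (l + 1) rt (by omega)).2]
        have : writeAsc (writeDesc (r.set l (some x)) rt (evens xs)) (l + 1) (odds xs)
            = writeAsc (writeDesc r rt (evens xs)) l (x :: odds xs) := by
          simp only [writeAsc]
          rw [writeDesc_set (evens xs) r l rt (some x) (by omega)]
        rw [this, writeAsc_writeDesc_comm (x :: odds xs) (evens xs) r l rt (by simp; omega)]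
      · show go2 (r.set rt (some x)) l (rt - 1) true xs = _
        rw [(ih (r.set rt (some x)) l (rt - 1) (by omega)).1]
        show _ = writeAsc (writeDesc (r.set rt (some x)) (rt - 1) (odds xs)) l (evens xs)
        rw [writeAsc_writeDesc_comm (evens xs) (odds xs) (r.set rt (some x)) l (rt - 1)
          (by omega)]

theorem writeAsc_fill (es : List String) :
    ∀ (a c : List (Option String)) (m : Nat), es.length ≤ m →
    writeAsc (a ++ List.replicate m none ++ c) a.length es
      = a ++ es.map some ++ List.replicate (m - es.length) none ++ c := by
  induction es with
  | nil => intro a c m _; simp [writeAsc]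
  | cons e es ih =>
      intro a c m h
      simp only [List.length_cons] at h
      obtain ⟨m', rfl⟩ : ∃ m', m = m' + 1 := ⟨m - 1, by omega⟩
      have hset : (a ++ List.replicate (m' + 1) (none : Option String) ++ c).set a.length (some e)
          = (a ++ [some e]) ++ List.replicate m' none ++ c := by
        rw [List.replicate_succ]
        simp [List.set_append_right, List.append_assoc]
      simp only [writeAsc, hset]
      have := ih (a ++ [some e]) c m' (by omega)
      simp only [List.length_append, List.length_cons, List.length_nil] at this
      rw [this]
      simp [List.append_assoc]

theorem writeDesc_fill (os : List String) :
    ∀ (a c : List (Option String)) (m : Nat), os.length ≤ m →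
    writeDesc (a ++ List.replicate m none ++ c) (a.length + m - 1) os
      = a ++ List.replicate (m - os.length) none ++ (os.map some).reverse ++ c := by
  induction os with
  | nil => intro a c m _; simp [writeDesc]
  | cons o os ih =>
      intro a c m h
      simp only [List.length_cons] at h
      obtain ⟨m', rfl⟩ : ∃ m', m = m' + 1 := ⟨m - 1, by omega⟩
      have hset : (a ++ List.replicate (m' + 1) (none : Option String) ++ c).set (a.length + (m' + 1) - 1) (some o)
          = a ++ List.replicate m' none ++ (some o :: c) := by
        have hsplit : a ++ List.replicate (m' + 1) (none : Option String) ++ c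
            = (a ++ List.replicate m' none) ++ (none :: c) := by
          rw [List.replicate_succ']
          simp [List.append_assoc]
        have hidx : a.length + (m' + 1) - 1 = (a ++ List.replicate m' (none : Option String)).length := by
          simp
        rw [hsplit, hidx, List.set_append_right _ _ (le_refl _)]
        simp [List.append_assoc]
      simp only [writeDesc, hset]
      have := ih a (some o :: c) m' (by omega)
      have hidx2 : a.length + (m' + 1) - 1 - 1 = a.length + m' - 1 := by omega
      rw [hidx2, this]
      simp [List.append_assoc]

theorem filterMap_range_evens (xs : List String) :
    List.filterMap (fun k => xs[2 * k]?) (List.range ((xs.length + 1) / 2)) = evens xs := by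
  induction xs using strided.induct with
  | case1 => rfl
  | case2 x => simp [evens, strided, List.range_succ]
  | case3 x y xs ih =>
      have hc : ((x :: y :: xs).length + 1) / 2 = (xs.length + 1) / 2 + 1 := by
        simp; omega
      rw [hc, List.range_succ_eq_map, List.filterMap_cons, List.filterMap_map]
      have hf : (fun k => (x :: y :: xs)[2 * (k + 1)]?) = fun k => xs[2 * k]? := by
        funext k
        have h2 : 2 * (k + 1) = 2 * k + 1 + 1 := by omega
        rw [h2, List.getElem?_cons_succ, List.getElem?_cons_succ]
      show ((x :: y :: xs)[0]?).toList ++ List.filterMap ((fun k => (x :: y :: xs)[2 * k]?) ∘ (· + 1)) (List.range ((xs.length + 1) / 2)) = _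
      have hcomp : ((fun k => (x :: y :: xs)[2 * k]?) ∘ (· + 1)) = fun k => xs[2 * k]? := by
        funext k
        simp only [Function.comp]
        have h2 : 2 * (k + 1) = 2 * k + 1 + 1 := by omega
        rw [h2, List.getElem?_cons_succ, List.getElem?_cons_succ]
      rw [hcomp, ih]
      simp [evens, strided]

theorem filterMap_range_odds (xs : List String) :
    List.filterMap (fun k => xs[1 + 2 * k]?) (List.range (xs.length / 2)) = odds xs := by
  induction xs using strided.induct with
  | case1 => rfl
  | case2 x => simp [odds, strided]
  | case3 x y xs ih =>
      have hc : (x :: y :: xs).length / 2 = xs.length / 2 + 1 := by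
        simp; omega
      rw [hc, List.range_succ_eq_map, List.filterMap_cons, List.filterMap_map]
      have hcomp : ((fun k => (x :: y :: xs)[1 + 2 * k]?) ∘ (· + 1)) = fun k => xs[1 + 2 * k]? := by
        funext k
        simp only [Function.comp]
        have h2 : 1 + 2 * (k + 1) = (1 + 2 * k) + 1 + 1 := by omega
        rw [h2, List.getElem?_cons_succ, List.getElem?_cons_succ]
      rw [hcomp, ih]
      simp [odds, List.tail, strided_cons]

theorem slice_step2 (xs : List String) :
    PySem.List.slice? xs none none 2 = some (evens xs) := by
  rw [PySem.List.slice?]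
  simp only [PySem.List.sliceIndices]
  norm_num
  have hcount : (if 0 < xs.length then (((xs.length : Int) + 2 - 1) / 2).toNat else 0)
      = (xs.length + 1) / 2 := by
    split <;> omega
  rw [hcount]
  have hf : (fun k : Nat => xs[(2 * (k : Int)).toNat]?) = fun k : Nat => xs[2 * k]? := by
    funext k
    have h2 : ((2 : Int) * (k : Int)).toNat = 2 * k := by omega
    rw [h2]
  rw [hf, filterMap_range_evens]

theorem slice_1_step2 (xs : List String) :
    PySem.List.slice? xs (some 1) none 2 = some (odds xs) := by
  rw [PySem.List.slice?]
  simp only [PySem.List.sliceIndices]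
  norm_num
  have hcount : (if 1 < xs.length then (((xs.length : Int) - min 1 (xs.length : Int) + 2 - 1) / 2).toNat else 0)
      = xs.length / 2 := by
    split <;> omega
  rw [hcount]
  have hf : (fun k : Nat => xs[(min 1 (xs.length : Int) + 2 * (k : Int)).toNat]?)
      = fun k : Nat => xs[1 + 2 * k]? := by
    funext k
    cases xs with
    | nil => simp
    | cons y ys =>
        congr 1
        simp
        omega
  rw [hf, filterMap_range_odds]

theorem reduceOption_map_some (l : List String) : (l.map some).reduceOption = l := by
  induction l <;> simp_all

theorem alt_eq (xs : List String) (h : ¬(xs.isEmpty || xs.length < 3)) :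
    reorder_lost_in_the_middle_alt xs = evens xs ++ (odds xs).reverse := by
  rw [reorder_lost_in_the_middle_alt, if_neg h]
  simp only [slice_step2, slice_1_step2, PySem.List.slice?_none_none_neg_one, Option.getD_some]

theorem a_eq (xs : List String) (h : ¬(xs.isEmpty || xs.length < 3)) :
    reorder_lost_in_the_middle xs = evens xs ++ (odds xs).reverse := by
  rw [reorder_lost_in_the_middle, if_neg h]
  simp only []
  rw [foldl_enum_eq_go2 xs 0]
  have hn : ¬ xs.length < 3 := by
    simp only [Bool.or_eq_true, decide_eq_true_eq] at h
    intro hc; exact h (Or.inr hc)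
  have hb : ((0 : Int) % 2 == 0) = true := by decide
  rw [hb]
  have hlen := length_evens_add_odds xs
  have hcond : 0 + (evens xs).length + (odds xs).length ≤ (xs.length - 1) + 1 := by omega
  rw [(go2_spec xs (List.replicate xs.length none) 0 (xs.length - 1) hcond).1]
  have hA := writeAsc_fill (evens xs) [] [] xs.length (by omega)
  simp only [List.length_nil, List.nil_append, List.append_nil] at hA
  rw [hA]
  have hD := writeDesc_fill (odds xs) ((evens xs).map some) [] (xs.length - (evens xs).length) (by omega)
  simp only [List.append_nil, List.length_map] at hD
  have hidx : (evens xs).length + (xs.length - (evens xs).length) - 1 = xs.length - 1 := by omega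
  rw [hidx] at hD
  rw [hD]
  have hz : xs.length - (evens xs).length - (odds xs).length = 0 := by omega
  rw [hz]
  simp [← List.map_reverse, List.reduceOption_append, reduceOption_map_some]

-- ===== VERDICT (by name: the statement is the Claim_ definition above) =====
theorem reorder_lost_in_the_middle_spec : Claim_equal_reorder_lost_in_the_middle := by
  intro chunks _
  unfold Spec_reorder_lost_in_the_middle
  by_cases h : chunks.isEmpty || chunks.length < 3
  · rw [reorder_lost_in_the_middle, if_pos h, reorder_lost_in_the_middle_alt, if_pos h]
  · rw [a_eq chunks h, alt_eq chunks h]
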